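-- pv_equiv track=rewrite | github.com/ulsdevteam/eprints-to-hyku-data-tool | convert-etd.py | parse_committee
-- ===== SOURCE A (Python) =====
-- def parse_committee(committee_list):
-- 	# we don't actually know for sure that we don't (or won't) have multiple chairs/cochairs
-- 	# so let's treat all of the roles as multi-fields
-- 	committee = []
-- 	committee_chair = []
-- 	committee_cochair = []
-- 	committee_members = []
--
-- 	if type(committee_list) == list:
-- 		for committee_member in committee_list:
-- 			temp_member = {}
-- 			temp_member['full-string'] = committee_member
--
-- 			# if we can't split the string, that means we don't
-- 			#	have a role to sort on. Let's default to committee member.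
-- 			#
-- 			# this is, annoyingly, more common than you'd think
-- 			if committee_member.find(" - ") == -1:
-- 				committee_members.append(committee_member)
-- 			else:
-- 				# if we DO have a role to split on:
-- 				(temp_member['name'], temp_member['role']) = committee_member.split(" - ", 1)
-- 				if temp_member['role'] == "Committee Chair":
-- 					committee_chair.append(temp_member['full-string'])
-- 				if temp_member['role'] == "Committee CoChair":
-- 					committee_cochair.append(temp_member['full-string'])
-- 				if temp_member['role'] == "Committee Member":
-- 					committee_members.append(temp_member['full-string'])
--
-- 		# Sort alphabetically within each role. Most of the names (all of the names?) are in
-- 		# last name comma first name. If they're not, we don't have enough information to plausibly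
-- 		# and sensitively identify how to sort by family name with both titles, middle names,
-- 		# and multiple family names in the mix, so we'll sort alphabetically by name as presented
-- 		# in each category and it should *generally* work.
-- 		committee_chair.sort()
-- 		committee_cochair.sort()
-- 		committee_members.sort()
-- 	else:
-- 		return
--
-- 	committee = committee_chair + committee_cochair + committee_members
-- 	return committee
-- ===== SOURCE B (Python) =====
-- # One-pass role-priority mapping + a single composite sort, instead of three buckets each sorted separately.
-- def _role_priority(member):
--     if member.find(" - ") == -1:
--         return 2
--     role = member.split(" - ", 1)[1]
--     if role == "Committee Chair":
--         return 0
--     if role == "Committee CoChair":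
--         return 1
--     if role == "Committee Member":
--         return 2
--     return None
--
-- def parse_committee(committee_list):
--     if type(committee_list) != list:
--         return
--     keyed = []
--     for member in committee_list:
--         priority = _role_priority(member)
--         if priority is not None:
--             keyed.append((priority, member))
--     keyed.sort()
--     return [member for _, member in keyed]
-- ===== Notes on version B (the rewrite author's own statement) =====
-- stated objective: simpler
-- what changed: A routes each member into one of three role buckets, sorts each bucket separately and concatenates; B tags each kept member with a role priority in one pass and performs a single composite sort on (priority, member) pairs.
import Mathlib
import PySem

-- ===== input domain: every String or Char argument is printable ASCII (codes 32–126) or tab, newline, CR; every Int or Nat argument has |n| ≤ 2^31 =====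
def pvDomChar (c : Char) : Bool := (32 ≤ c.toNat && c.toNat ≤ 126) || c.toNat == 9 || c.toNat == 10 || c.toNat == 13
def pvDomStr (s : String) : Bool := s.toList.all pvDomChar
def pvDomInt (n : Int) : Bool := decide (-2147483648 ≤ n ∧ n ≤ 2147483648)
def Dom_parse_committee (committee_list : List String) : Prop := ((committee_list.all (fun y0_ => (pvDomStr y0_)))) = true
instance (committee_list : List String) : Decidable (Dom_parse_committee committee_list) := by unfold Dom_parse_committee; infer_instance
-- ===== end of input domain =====

-- B replaces A's three role buckets (each sorted, then concatenated) by a one-pass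
-- (priority, member) tagging followed by a single composite sort; objective: simpler.
-- (In Python, A returns None for non-list arguments; the Lean signature admits lists only.)

-- ===== PORT A =====
-- the body of A's for-loop: route the member into one of the three role buckets
def stepA (st : List String × List String × List String) (committee_member : String) :
    List String × List String × List String :=
  if PySem.Str.find committee_member " - " = -1 then
    (st.1, st.2.1, st.2.2 ++ [committee_member])
  else
    let role := ((PySem.Str.splitMax? committee_member " - " 1).getD []).getD 1 ""
    (if role = "Committee Chair" then st.1 ++ [committee_member] else st.1,
     if role = "Committee CoChair" then st.2.1 ++ [committee_member] else st.2.1,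
     if role = "Committee Member" then st.2.2 ++ [committee_member] else st.2.2)

def parse_committee (committee_list : List String) : List String :=
  let st := committee_list.foldl stepA ([], [], [])
  PySem.List.sorted st.1 (fun x => x) false ++
    PySem.List.sorted st.2.1 (fun x => x) false ++
    PySem.List.sorted st.2.2 (fun x => x) false

-- ===== PORT B =====
def rolePriority (member : String) : Option Int :=
  if PySem.Str.find member " - " = -1 then some 2
  else
    let role := ((PySem.Str.splitMax? member " - " 1).getD []).getD 1 ""
    if role = "Committee Chair" then some 0
    else if role = "Committee CoChair" then some 1
    else if role = "Committee Member" then some 2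
    else none

-- the body of B's for-loop: tag the member with its role priority, or drop it
def stepB (acc : List (Int × String)) (member : String) : List (Int × String) :=
  match rolePriority member with
  | some p => acc ++ [(p, member)]
  | none => acc

def parse_committee_alt (committee_list : List String) : List String :=
  let keyed := committee_list.foldl stepB []
  (PySem.List.sorted2 keyed (fun t => t.1) (fun t => t.2) false).map Prod.snd

-- ===== PRECONDITION & SPEC =====
def Spec_parse_committee (committee_list : List String) (out : List String) : Prop := out = parse_committee_alt committee_list
instance (committee_list : List String) (out : List String) : Decidable (Spec_parse_committee committee_list out) := by unfold Spec_parse_committee; infer_instance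

-- ===== CLAIM (what is proved, stated in full; the proofs are below) =====
def Claim_equal_parse_committee : Prop := ∀ (committee_list : List String), Dom_parse_committee committee_list → Spec_parse_committee committee_list (parse_committee committee_list)

-- ===== LEMMAS AND PROOFS =====

-- the weak lexicographic order on (priority, member) pairs
def lexLe (p q : Int × String) : Prop := p.1 < q.1 ∨ (p.1 = q.1 ∧ p.2 ≤ q.2)

-- the strict comparison sorted2 uses, specialised to our keys
def lt2 (p q : Int × String) : Bool :=
  decide (p.1 < q.1) || (!decide (q.1 < p.1) && decide (p.2 < q.2))

-- A's three tagged-and-concatenated buckets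
def tag3 (c co me : List String) : List (Int × String) :=
  c.map (fun s => ((0 : Int), s)) ++ co.map (fun s => ((1 : Int), s)) ++
    me.map (fun s => ((2 : Int), s))

theorem lt2_false_iff (p q : Int × String) : lt2 q p = false ↔ lexLe p q := by
  simp only [lt2, lexLe, Bool.or_eq_false_iff, Bool.and_eq_false_iff,
    Bool.not_eq_false', decide_eq_false_iff_not, decide_eq_true_eq]
  constructor
  · rintro ⟨h1, h2 | h2⟩
    · exact Or.inl h2
    · rcases lt_or_ge p.1 q.1 with h | h
      · exact Or.inl h
      · exact Or.inr ⟨le_antisymm (not_lt.mp h1) h, not_lt.mp h2⟩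
  · rintro (h | ⟨h1, h2⟩)
    · exact ⟨not_lt.mpr h.le, Or.inl h⟩
    · exact ⟨not_lt.mpr h1.le, Or.inr (not_lt.mpr h2)⟩

theorem lt2_true_lexLe (p q : Int × String) (h : lt2 p q = true) : lexLe p q := by
  simp only [lt2, Bool.or_eq_true, Bool.and_eq_true, Bool.not_eq_eq_eq_not,
    Bool.not_true, decide_eq_false_iff_not, decide_eq_true_eq] at h
  rcases h with h | ⟨h1, h2⟩
  · exact Or.inl h
  · rcases lt_or_ge p.1 q.1 with h' | h'
    · exact Or.inl h'
    · exact Or.inr ⟨le_antisymm (not_lt.mp h1) h', h2.le⟩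

theorem lexLe_trans {p q r : Int × String} (h1 : lexLe p q) (h2 : lexLe q r) : lexLe p r := by
  rcases h1 with h1 | ⟨h1, h1'⟩ <;> rcases h2 with h2 | ⟨h2, h2'⟩
  · exact Or.inl (h1.trans h2)
  · exact Or.inl (h2 ▸ h1)
  · exact Or.inl (h1 ▸ h2)
  · exact Or.inr ⟨h1.trans h2, h1'.trans h2'⟩

theorem lexLe_antisymm {p q : Int × String} (h1 : lexLe p q) (h2 : lexLe q p) : p = q := by
  rcases h1 with h1 | ⟨h1, h1'⟩ <;> rcases h2 with h2 | ⟨h2, h2'⟩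
  · exact absurd h2 (not_lt.mpr h1.le)
  · exact absurd h1 (not_lt.mpr h2.le)
  · exact absurd h2 (not_lt.mpr h1.le)
  · exact Prod.ext h1 (le_antisymm h1' h2')

theorem pairwise_insertBy (x : Int × String) (ys : List (Int × String)) :
    ys.Pairwise lexLe → (PySem.List.insertBy lt2 x ys).Pairwise lexLe := by
  induction ys with
  | nil => intro _; simp [PySem.List.insertBy]
  | cons y ys ih =>
    intro h
    rw [List.pairwise_cons] at h
    obtain ⟨hy, hys⟩ := h
    by_cases hxy : lt2 x y = true
    · rw [show PySem.List.insertBy lt2 x (y :: ys) = x :: y :: ys by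
        simp [PySem.List.insertBy, hxy]]
      refine List.Pairwise.cons ?_ (List.Pairwise.cons hy hys)
      intro z hz
      rcases List.mem_cons.mp hz with rfl | hz
      · exact lt2_true_lexLe _ _ hxy
      · exact lexLe_trans (lt2_true_lexLe _ _ hxy) (hy z hz)
    · rw [show PySem.List.insertBy lt2 x (y :: ys) = y :: PySem.List.insertBy lt2 x ys by
        simp [PySem.List.insertBy, hxy]]
      refine List.Pairwise.cons ?_ (ih hys)
      intro z hz
      rcases (PySem.List.mem_insertBy lt2 x z ys).mp hz with rfl | hz
      · exact (lt2_false_iff y z).mp (Bool.not_eq_true _ ▸ hxy)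
      · exact hy z hz

theorem pairwise_sorted2 (xs : List (Int × String)) :
    (PySem.List.sorted2 xs (fun t => t.1) (fun t => t.2) false).Pairwise lexLe := by
  show (List.foldl (fun acc x => PySem.List.insertBy lt2 x acc) [] xs).Pairwise lexLe
  have key : ∀ (acc : List (Int × String)), acc.Pairwise lexLe →
      (List.foldl (fun acc x => PySem.List.insertBy lt2 x acc) acc xs).Pairwise lexLe := by
    induction xs with
    | nil => intro acc h; exact h
    | cons x xs ih => intro acc h; exact ih _ (pairwise_insertBy x acc h)
  exact key [] List.Pairwise.nil

-- the fold invariant: B's keyed list stays a permutation of A's tagged buckets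
theorem keyed_perm (committee_list : List String) :
    ∀ (c co me : List String) (K : List (Int × String)), (tag3 c co me).Perm K →
    (tag3 (committee_list.foldl stepA (c, co, me)).1
          (committee_list.foldl stepA (c, co, me)).2.1
          (committee_list.foldl stepA (c, co, me)).2.2).Perm
      (committee_list.foldl stepB K) := by
  induction committee_list with
  | nil => intro c co me K hinv; simpa using hinv
  | cons m rest ih =>
    intro c co me K hinv
    simp only [List.foldl_cons]
    by_cases hf : PySem.Str.find m " - " = -1
    · rw [show stepA (c, co, me) m = (c, co, me ++ [m]) by simp only [stepA, if_pos hf],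
        show stepB K m = K ++ [((2 : Int), m)] by simp only [stepB, rolePriority, if_pos hf]]
      refine ih c co (me ++ [m]) _ (List.Perm.trans ?_ (hinv.append_right [((2 : Int), m)]))
      refine Multiset.coe_eq_coe.mp ?_
      simp only [tag3, List.map_append, List.map_cons, List.map_nil, ← Multiset.coe_add,
        ← Multiset.cons_coe, ← Multiset.singleton_add]
      abel
    · by_cases h0 : ((PySem.Str.splitMax? m " - " 1).getD []).getD 1 "" = "Committee Chair"
      · rw [show stepA (c, co, me) m = (c ++ [m], co, me) by
            simp only [stepA, if_neg hf]
            rw [if_pos h0, if_neg (by rw [h0]; decide), if_neg (by rw [h0]; decide)],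
          show stepB K m = K ++ [((0 : Int), m)] by
            simp only [stepB, rolePriority, if_neg hf]; rw [if_pos h0]]
        refine ih (c ++ [m]) co me _ (List.Perm.trans ?_ (hinv.append_right [((0 : Int), m)]))
        refine Multiset.coe_eq_coe.mp ?_
        simp only [tag3, List.map_append, List.map_cons, List.map_nil, ← Multiset.coe_add,
          ← Multiset.cons_coe, ← Multiset.singleton_add]
        abel
      · by_cases h1 : ((PySem.Str.splitMax? m " - " 1).getD []).getD 1 "" = "Committee CoChair"
        · rw [show stepA (c, co, me) m = (c, co ++ [m], me) by
              simp only [stepA, if_neg hf]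
              rw [if_neg h0, if_pos h1, if_neg (by rw [h1]; decide)],
            show stepB K m = K ++ [((1 : Int), m)] by
              simp only [stepB, rolePriority, if_neg hf]; rw [if_neg h0, if_pos h1]]
          refine ih c (co ++ [m]) me _ (List.Perm.trans ?_ (hinv.append_right [((1 : Int), m)]))
          refine Multiset.coe_eq_coe.mp ?_
          simp only [tag3, List.map_append, List.map_cons, List.map_nil, ← Multiset.coe_add,
            ← Multiset.cons_coe, ← Multiset.singleton_add]
          abel
        · by_cases h2 : ((PySem.Str.splitMax? m " - " 1).getD []).getD 1 "" = "Committee Member"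
          · rw [show stepA (c, co, me) m = (c, co, me ++ [m]) by
                simp only [stepA, if_neg hf]; rw [if_neg h0, if_neg h1, if_pos h2],
              show stepB K m = K ++ [((2 : Int), m)] by
                simp only [stepB, rolePriority, if_neg hf]; rw [if_neg h0, if_neg h1, if_pos h2]]
            refine ih c co (me ++ [m]) _ (List.Perm.trans ?_ (hinv.append_right [((2 : Int), m)]))
            refine Multiset.coe_eq_coe.mp ?_
            simp only [tag3, List.map_append, List.map_cons, List.map_nil, ← Multiset.coe_add,
              ← Multiset.cons_coe, ← Multiset.singleton_add]
            abel
          · rw [show stepA (c, co, me) m = (c, co, me) by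
                simp only [stepA, if_neg hf]; rw [if_neg h0, if_neg h1, if_neg h2],
              show stepB K m = K by
                simp only [stepB, rolePriority, if_neg hf]; rw [if_neg h0, if_neg h1, if_neg h2]]
            exact ih c co me K hinv

theorem pairwise_block (c co me : List String) :
    (tag3 (PySem.List.sorted c (fun x => x) false)
          (PySem.List.sorted co (fun x => x) false)
          (PySem.List.sorted me (fun x => x) false)).Pairwise lexLe := by
  unfold tag3
  rw [List.pairwise_append, List.pairwise_append]
  refine ⟨⟨?_, ?_, ?_⟩, ?_, ?_⟩
  · exact List.pairwise_map.mpr ((PySem.List.sorted_pairwise c _).imp (fun h => Or.inr ⟨rfl, h⟩))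
  · exact List.pairwise_map.mpr ((PySem.List.sorted_pairwise co _).imp (fun h => Or.inr ⟨rfl, h⟩))
  · intro a ha b hb
    rcases List.mem_map.mp ha with ⟨_, _, rfl⟩
    rcases List.mem_map.mp hb with ⟨_, _, rfl⟩
    exact Or.inl (by norm_num)
  · exact List.pairwise_map.mpr ((PySem.List.sorted_pairwise me _).imp (fun h => Or.inr ⟨rfl, h⟩))
  · intro a ha b hb
    rcases List.mem_append.mp ha with ha | ha <;>
      rcases List.mem_map.mp ha with ⟨_, _, rfl⟩ <;>
      rcases List.mem_map.mp hb with ⟨_, _, rfl⟩ <;>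
      exact Or.inl (by norm_num)

-- ===== VERDICT (by name: the statement is the Claim_ definition above) =====
theorem parse_committee_spec : Claim_equal_parse_committee := by
  intro committee_list _
  unfold Spec_parse_committee parse_committee parse_committee_alt
  set st := committee_list.foldl stepA ([], [], []) with hst
  set K := committee_list.foldl stepB [] with hK
  have hperm : (tag3 (PySem.List.sorted st.1 (fun x => x) false)
      (PySem.List.sorted st.2.1 (fun x => x) false)
      (PySem.List.sorted st.2.2 (fun x => x) false)).Perm
      (PySem.List.sorted2 K (fun t => t.1) (fun t => t.2) false) := by
    have h1 : (tag3 (PySem.List.sorted st.1 (fun x => x) false)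
        (PySem.List.sorted st.2.1 (fun x => x) false)
        (PySem.List.sorted st.2.2 (fun x => x) false)).Perm (tag3 st.1 st.2.1 st.2.2) :=
      (((PySem.List.sorted_perm st.1 _ false).map _).append
        ((PySem.List.sorted_perm st.2.1 _ false).map _)).append
        ((PySem.List.sorted_perm st.2.2 _ false).map _)
    have h2 := keyed_perm committee_list [] [] [] [] (by simp [tag3])
    exact (h1.trans h2).trans (PySem.List.sorted2_perm K _ _ false).symm
  have heq : tag3 (PySem.List.sorted st.1 (fun x => x) false)
      (PySem.List.sorted st.2.1 (fun x => x) false)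
      (PySem.List.sorted st.2.2 (fun x => x) false) =
      PySem.List.sorted2 K (fun t => t.1) (fun t => t.2) false :=
    List.Perm.eq_of_pairwise (fun a b _ _ => lexLe_antisymm)
      (pairwise_block st.1 st.2.1 st.2.2) (pairwise_sorted2 K) hperm
  dsimp only
  rw [← heq]
  simp [tag3, List.map_map, Function.comp_def]
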